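-- pv_equiv track=rewrite | github.com/MrBrantCode/unitest_baseline | mut_generate/mist_train_taco/taco_14707/solution.py | find_max_bitwise_and_of_subsequence_beauties
-- ===== SOURCE A (Python) =====
-- def find_max_bitwise_and_of_subsequence_beauties(N, K, A):
--     S = [0]
--     for i in range(N):
--         S.append(A[i] + S[-1])
--
--     B = []
--     for i in range(len(S)):
--         for j in range(i + 1, len(S)):
--             B.append(S[j] - S[i])
--
--     ans = 0
--     for i in range(50, -1, -1):
--         ans += 2 ** i
--         c = 0
--         for j in range(len(B)):
--             if B[j] & ans == ans:
--                 c += 1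
--         if c < K:
--             ans -= 2 ** i
--
--     return ans
-- ===== SOURCE B (Python) =====
-- def find_max_bitwise_and_of_subsequence_beauties(N, K, A):
--     # all subarray sums, by a running accumulation from each start index
--     sums = []
--     for i in range(N):
--         s = 0
--         for j in range(i, N):
--             s += A[j]
--             sums.append(s)
--
--     # descend the (implicit) binary trie of the sums from the top bit:
--     # keep the 1-branch whenever it still holds at least K numbers
--     def best(bit, cand):
--         if bit < 0:
--             return 0
--         hi = [b for b in cand if b & (1 << bit)]
--         if len(hi) >= K:
--             return (1 << bit) + best(bit - 1, hi)
--         return best(bit - 1, cand)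
--
--     return best(50, sums)
-- ===== Notes on version B (the rewrite author's own statement) =====
-- stated objective: alternative
-- what changed: B builds the subarray sums by running accumulation from each start index (no prefix-sum table and no pairwise-difference double scan over it) and replaces A's iterative running-mask greedy, which rescans the whole O(N^2) sums list with a full mask-containment test for each of the 51 bits, by a recursive descent of the implicit binary trie of the sums: at each level the surviving candidates are partitioned on that single bit and the 1-branch is kept when it still holds at least K numbers, the answer being composed as 2^bit plus the recursive result.
import Mathlib
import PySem

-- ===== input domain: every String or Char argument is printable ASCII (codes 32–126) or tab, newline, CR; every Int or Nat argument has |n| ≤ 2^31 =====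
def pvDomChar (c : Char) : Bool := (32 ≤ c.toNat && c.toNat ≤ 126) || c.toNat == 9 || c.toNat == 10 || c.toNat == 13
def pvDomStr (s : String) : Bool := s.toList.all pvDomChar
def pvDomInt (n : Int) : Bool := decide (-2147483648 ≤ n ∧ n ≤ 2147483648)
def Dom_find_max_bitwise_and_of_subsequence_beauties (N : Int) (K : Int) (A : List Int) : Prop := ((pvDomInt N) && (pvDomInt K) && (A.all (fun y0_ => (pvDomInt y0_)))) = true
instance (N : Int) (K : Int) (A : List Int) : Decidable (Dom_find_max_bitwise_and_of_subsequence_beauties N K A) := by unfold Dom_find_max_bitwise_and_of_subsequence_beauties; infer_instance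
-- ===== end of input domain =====

-- B builds the subarray sums by running accumulation per start (no prefix-sum table) and replaces A's
-- iterative running-mask greedy (51 full rescans of the sums list) by a recursive descent of the
-- implicit binary trie of the sums: at each bit it splits the surviving candidates on that single
-- bit and keeps the 1-branch when it still holds at least K numbers, composing the answer from
-- the recursive result.  Objective: alternative decomposition (same asymptotic cost).

-- ===== PORT A =====
def find_max_bitwise_and_of_subsequence_beauties (N : Int) (K : Int) (A : List Int) : Int :=
  -- S = [0]; for i in range(N): S.append(A[i] + S[-1])
  let S : List Int := (PySem.List.pyRange 0 N 1).foldl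
    (fun S i => S ++ [PySem.List.pyGetD A i 0 + PySem.List.pyGetD S (-1) 0]) [0]
  -- B = []; for i in range(len(S)): for j in range(i+1, len(S)): B.append(S[j] - S[i])
  let B : List Int := (PySem.List.pyRange 0 (S.length : Int) 1).foldl
    (fun acc i => (PySem.List.pyRange (i + 1) (S.length : Int) 1).foldl
      (fun acc2 j => acc2 ++ [PySem.List.pyGetD S j 0 - PySem.List.pyGetD S i 0]) acc) []
  -- greedy over bits 50..0; 2 ** i ported as 2 ^ i.toNat (i ≥ 0 throughout range(50,-1,-1))
  (PySem.List.pyRange 50 (-1) (-1)).foldl (fun ans i =>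
    let ans1 := ans + 2 ^ i.toNat
    let c : Int := (PySem.List.pyRange 0 (B.length : Int) 1).foldl
      (fun c j => if PySem.Int.band (PySem.List.pyGetD B j 0) ans1 == ans1 then c + 1 else c) 0
    if c < K then ans1 - 2 ^ i.toNat else ans1) 0

-- ===== PORT B =====
-- best(bit, cand): recursion on bit from 50 down to -1, transcribed structurally with the
-- counter n = bit + 1 (so n = 0 is Python's 'bit < 0' base case and bit = n - 1 = n').
-- Python's truthiness test 'if b & (1 << bit)' is 'band b (1 <<< bit) != 0'.
def pvBest (K : Int) : Nat → List Int → Int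
  | 0, _ => 0
  | n + 1, cand =>
    let hi := cand.filter (fun b => PySem.Int.band b (1 <<< n) != 0)
    if K ≤ (hi.length : Int) then (1 <<< n) + pvBest K n hi
    else pvBest K n cand

def find_max_bitwise_and_of_subsequence_beauties_alt (N : Int) (K : Int) (A : List Int) : Int :=
  -- sums: for i in range(N): s = 0; for j in range(i, N): s += A[j]; sums.append(s)
  let sums : List Int := (PySem.List.pyRange 0 N 1).foldl (fun acc i =>
    ((PySem.List.pyRange i N 1).foldl (fun (p : List Int × Int) j =>
      let s := p.2 + PySem.List.pyGetD A j 0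
      (p.1 ++ [s], s)) (acc, 0)).1) []
  -- return best(50, sums)
  pvBest K 51 sums

-- ===== PRECONDITION & SPEC =====
-- Pre_ excludes exactly the inputs where A raises IndexError: N > len(A) (A[i] out of range).
def Pre_find_max_bitwise_and_of_subsequence_beauties (N : Int) (K : Int) (A : List Int) : Prop :=
  N ≤ (A.length : Int)
instance (N : Int) (K : Int) (A : List Int) : Decidable (Pre_find_max_bitwise_and_of_subsequence_beauties N K A) := by
  unfold Pre_find_max_bitwise_and_of_subsequence_beauties; infer_instance

def pvWitness_find_max_bitwise_and_of_subsequence_beauties : Int × Int × List Int := (3, 2, [1, 2, 3])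

def Spec_find_max_bitwise_and_of_subsequence_beauties (N : Int) (K : Int) (A : List Int) (out : Int) : Prop := out = find_max_bitwise_and_of_subsequence_beauties_alt N K A
instance (N : Int) (K : Int) (A : List Int) (out : Int) : Decidable (Spec_find_max_bitwise_and_of_subsequence_beauties N K A out) := by unfold Spec_find_max_bitwise_and_of_subsequence_beauties; infer_instance

-- ===== CLAIM (what is proved, stated in full; the proofs are below) =====
def Claim_equal_find_max_bitwise_and_of_subsequence_beauties : Prop := ∀ (N : Int) (K : Int) (A : List Int), Dom_find_max_bitwise_and_of_subsequence_beauties N K A → Pre_find_max_bitwise_and_of_subsequence_beauties N K A → Spec_find_max_bitwise_and_of_subsequence_beauties N K A (find_max_bitwise_and_of_subsequence_beauties N K A)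

-- ===== LEMMAS AND PROOFS =====

/-- prefix sum of the first `i` elements of `A` -/
def pvT (A : List Int) (i : Nat) : Int := (A.take i).sum

/-- the common list of subarray sums, in the order both programs produce it -/
def pvRef (A : List Int) (n : Nat) : List Int :=
  (List.range n).flatMap (fun i => (List.range (n - i)).map (fun t => pvT A (i + 1 + t) - pvT A i))

/-- does `b` contain all bits of `p`? (Python `b & p == p`) -/
def pvMatch (p b : Int) : Bool := PySem.Int.band b p == p

/-- Python's `n`-th bit of the (possibly negative) integer `b` -/
def pvTB (b : Int) (i : Nat) : Bool :=
  if 0 ≤ b then b.toNat.testBit i else !((-b - 1).toNat.testBit i)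

/-- A's greedy step, with the count loop expressed as `countP` -/
def pvAstep (K : Int) (sums : List Int) (ans i : Int) : Int :=
  let ans1 := ans + 2 ^ i.toNat
  if ((sums.countP (fun b => pvMatch ans1 b) : Int)) < K then ans1 - 2 ^ i.toNat else ans1

theorem pvMatch_zero (b : Int) : pvMatch 0 b = true := by
  simp [pvMatch, PySem.Int.band]

theorem pvAndEq (a p : Nat) : a &&& p = p ↔ ∀ i, p.testBit i = true → a.testBit i = true := by
  constructor
  · intro h i hp
    have := congrArg (fun x => Nat.testBit x i) h
    simp only [Nat.testBit_and, hp, Bool.and_true] at this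
    exact this
  · intro h
    apply Nat.eq_of_testBit_eq
    intro i
    rw [Nat.testBit_and]
    by_cases hp : p.testBit i = true
    · simp [hp, h i hp]
    · simp at hp; simp [hp]

theorem pvAndZero (p c : Nat) : p &&& c = 0 ↔ ∀ i, p.testBit i = true → c.testBit i = false := by
  constructor
  · intro h i hp
    have := congrArg (fun x => Nat.testBit x i) h
    simp only [Nat.testBit_and, hp, Bool.true_and, Nat.zero_testBit] at this
    exact this
  · intro h
    apply Nat.eq_of_testBit_eq
    intro i
    rw [Nat.testBit_and, Nat.zero_testBit]
    by_cases hp : p.testBit i = true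
    · simp [hp, h i hp]
    · simp at hp; simp [hp]

theorem pvMatch_iff (p b : Int) (hp : 0 ≤ p) :
    pvMatch p b = true ↔ ∀ i, p.toNat.testBit i = true → pvTB b i = true := by
  unfold pvMatch pvTB PySem.Int.band
  by_cases hb : 0 ≤ b
  · simp only [if_pos hb, if_pos hp, beq_iff_eq]
    rw [show ((b.toNat &&& p.toNat : Nat) : Int) = p ↔ b.toNat &&& p.toNat = p.toNat from by omega]
    simp only [pvAndEq]
  · simp only [if_neg hb, if_pos hp, beq_iff_eq]
    have hle : p.toNat &&& (-b - 1).toNat ≤ p.toNat := Nat.and_le_left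
    rw [show ((p.toNat - (p.toNat &&& (-b - 1).toNat) : Nat) : Int) = p
          ↔ p.toNat &&& (-b - 1).toNat = 0 from by omega]
    simp only [pvAndZero, Bool.not_eq_true']

theorem pvBandBit (b : Int) (k : Nat) :
    (PySem.Int.band b (1 <<< k) != 0) = pvTB b k := by
  have hsh : (1 <<< k : Nat) = 2 ^ k := Nat.one_shiftLeft k
  have hp : (0 : Int) ≤ ((1 <<< k : Nat) : Int) := by positivity
  have htn : (((1 <<< k : Nat) : Int)).toNat = 2 ^ k := by rw [hsh, Int.toNat_natCast]
  unfold PySem.Int.band pvTB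
  by_cases hb : 0 ≤ b
  · simp only [if_pos hb, if_pos hp, htn]
    rw [Nat.and_two_pow]
    cases htb : b.toNat.testBit k
    · simp
    · simp
  · simp only [if_neg hb, if_pos hp, htn]
    rw [Nat.and_comm, Nat.and_two_pow]
    cases htb : (-b - 1).toNat.testBit k
    · simp
    · simp

theorem pvBitsAdd (m k i : Nat) :
    (2 ^ (k + 1) * m + 2 ^ k).testBit i = (if i = k then true else (2 ^ (k + 1) * m).testBit i) := by
  rw [Nat.testBit_two_pow_mul_add _ (by simp [Nat.pow_lt_pow_succ]), Nat.testBit_two_pow_mul]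
  rcases lt_trichotomy i k with h | h | h
  · rw [if_pos (by omega), if_neg (by omega), Nat.testBit_two_pow,
        decide_eq_false (show ¬ (k = i) by omega),
        decide_eq_false (show ¬ (i ≥ k + 1) by omega)]
    simp
  · subst h
    rw [if_pos (by omega), if_pos rfl, Nat.testBit_two_pow]
    simp
  · rw [if_neg (by omega), if_neg (by omega), decide_eq_true (show i ≥ k + 1 by omega)]
    simp

/-- splitting one greedy test: when `ans` only has bits above `k`,
`b ⊇ ans + 2^k` is exactly `b ⊇ ans` and bit `k` of `b`. -/
theorem pvSplit (ans b : Int) (k : Nat) (hnn : 0 ≤ ans)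
    (hdvd : ((2 : Int) ^ (k + 1)) ∣ ans) :
    pvMatch (ans + 2 ^ k) b = (pvMatch ans b && (PySem.Int.band b (1 <<< k) != 0)) := by
  obtain ⟨m, hm⟩ := hdvd
  have hm0 : 0 ≤ m := by
    by_contra hc
    have hc' : m < 0 := Int.not_le.mp hc
    nlinarith [pow_pos (show (0 : Int) < 2 by norm_num) (k + 1)]
  have hp0 : (0 : Int) ≤ ans + 2 ^ k := by positivity
  have haN : ans.toNat = 2 ^ (k + 1) * m.toNat := by
    have : ((2 ^ (k + 1) * m.toNat : Nat) : Int) = ans := by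
      push_cast [Int.toNat_of_nonneg hm0]; rw [hm]
    omega
  have hpN : (ans + 2 ^ k).toNat = 2 ^ (k + 1) * m.toNat + 2 ^ k := by
    have : ((2 ^ (k + 1) * m.toNat + 2 ^ k : Nat) : Int) = ans + 2 ^ k := by
      push_cast [Int.toNat_of_nonneg hm0]; rw [hm]
    omega
  rw [Bool.eq_iff_iff]
  rw [pvMatch_iff _ b hp0, Bool.and_eq_true, pvMatch_iff _ b hnn, pvBandBit]
  rw [hpN, haN]
  constructor
  · intro h
    refine ⟨fun i hi => h i ?_, h k ?_⟩
    · rw [pvBitsAdd]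
      by_cases hik : i = k
      · simp [hik]
      · rw [if_neg hik]; exact hi
    · rw [pvBitsAdd]; simp
  · rintro ⟨h1, h2⟩ i hi
    rw [pvBitsAdd] at hi
    by_cases hik : i = k
    · subst hik; exact h2
    · rw [if_neg hik] at hi; exact h1 i hi

/-- the survivors of bit `k` among the candidates matching `ans` are
exactly the elements matching `ans + 2^k` -/
theorem pvHi (sums : List Int) (ans : Int) (k : Nat) (hnn : 0 ≤ ans)
    (hdvd : ((2 : Int) ^ (k + 1)) ∣ ans) :
    (sums.filter (fun b => pvMatch ans b)).filter (fun b => PySem.Int.band b (1 <<< k) != 0)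
      = sums.filter (fun b => pvMatch (ans + 2 ^ k) b) := by
  rw [List.filter_filter]
  apply List.filter_congr
  intro x _
  rw [pvSplit ans x k hnn hdvd, Bool.and_comm]

theorem pvBest_succ (K : Int) (n : Nat) (cand : List Int) :
    pvBest K (n + 1) cand =
      (if K ≤ (((cand.filter (fun b => PySem.Int.band b (1 <<< n) != 0)).length : Nat) : Int)
       then (1 <<< n) + pvBest K n (cand.filter (fun b => PySem.Int.band b (1 <<< n) != 0))
       else pvBest K n cand) := rfl

theorem pvAstep_eq (K : Int) (sums : List Int) (ans : Int) (k : Nat) :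
    pvAstep K sums ans ((k : Nat) : Int)
      = if ((sums.countP (fun b => pvMatch (ans + 2 ^ k) b) : Nat) : Int) < K
        then ans else ans + 2 ^ k := by
  unfold pvAstep
  simp only [Int.toNat_natCast]
  split_ifs <;> ring

/-- the two greedy halves agree: the fold over bits `k..0` of A equals `ans` plus the
trie descent on the candidates that already match `ans`. -/
theorem pvG (K : Int) (sums : List Int) : ∀ (k : Nat) (ans : Int), 0 ≤ ans →
    ((2 : Int) ^ (k + 1)) ∣ ans →
    (PySem.List.pyRange (k : Int) (-1) (-1)).foldl (pvAstep K sums) ans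
      = ans + pvBest K (k + 1) (sums.filter (fun b => pvMatch ans b)) := by
  intro k
  induction k with
  | zero =>
    intro ans hnn hdvd
    have h1 : PySem.List.pyRange ((0 : Nat) : Int) (-1) (-1) = [((0 : Nat) : Int)] := by decide
    rw [h1]
    simp only [List.foldl_cons, List.foldl_nil]
    rw [pvAstep_eq K sums ans 0]
    rw [pvBest_succ K 0]
    have hc : ((sums.filter (fun b => pvMatch ans b)).filter
          (fun b => PySem.Int.band b (1 <<< 0) != 0)).length
        = sums.countP (fun b => pvMatch (ans + 2 ^ 0) b) := by
      rw [pvHi sums ans 0 hnn (by simpa using hdvd), List.countP_eq_length_filter]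
    by_cases hK : ((sums.countP (fun b => pvMatch (ans + 2 ^ 0) b) : Nat) : Int) < K
    · rw [if_pos hK, if_neg (by omega)]
      simp [pvBest]
    · rw [if_neg hK, if_pos (by omega)]
      simp [pvBest]
  | succ k ih =>
    intro ans hnn hdvd
    rw [show ((k + 1 : Nat) : Int) = (k : Int) + 1 from by push_cast; ring]
    rw [PySem.List.pyRange_neg_one_cons (by omega)]
    rw [show (k : Int) + 1 - 1 = (k : Int) from by ring]
    simp only [List.foldl_cons]
    rw [show pvAstep K sums ans ((k : Int) + 1) = pvAstep K sums ans (((k + 1 : Nat)) : Int) from by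
      norm_num]
    rw [pvAstep_eq K sums ans (k + 1)]
    rw [pvBest_succ K (k + 1)]
    have hc : ((sums.filter (fun b => pvMatch ans b)).filter
          (fun b => PySem.Int.band b (1 <<< (k + 1)) != 0)).length
        = sums.countP (fun b => pvMatch (ans + 2 ^ (k + 1)) b) := by
      rw [pvHi sums ans (k + 1) hnn hdvd, List.countP_eq_length_filter]
    by_cases hK : ((sums.countP (fun b => pvMatch (ans + 2 ^ (k + 1)) b) : Nat) : Int) < K
    · rw [if_pos hK, if_neg (by omega)]
      exact ih ans hnn (dvd_trans (pow_dvd_pow 2 (by omega)) hdvd)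
    · rw [if_neg hK, if_pos (by omega)]
      have hnn' : 0 ≤ ans + 2 ^ (k + 1) := by positivity
      have hdvd' : ((2 : Int) ^ (k + 1)) ∣ ans + 2 ^ (k + 1) :=
        dvd_add (dvd_trans (pow_dvd_pow 2 (by omega)) hdvd) dvd_rfl
      rw [ih (ans + 2 ^ (k + 1)) hnn' hdvd', pvHi sums ans (k + 1) hnn hdvd]
      have hsh : (((1 <<< (k + 1) : Nat)) : Int) = 2 ^ (k + 1) := by
        rw [Nat.one_shiftLeft]; push_cast; ring
      rw [hsh]
      ring

theorem pvT_succ (A : List Int) (k : Nat) (h : k < A.length) :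
    pvT A (k + 1) = pvT A k + A.getD k 0 := by
  rw [pvT, pvT, List.sum_take_succ A k h, List.getD_eq_getElem _ _ h]

theorem pvS_char (A : List Int) (n : Nat) (h : n ≤ A.length) :
    (PySem.List.pyRange 0 (n : Int) 1).foldl
      (fun S i => S ++ [PySem.List.pyGetD A i 0 + PySem.List.pyGetD S (-1) 0]) [0]
    = (List.range (n + 1)).map (pvT A) := by
  induction n with
  | zero => simp [PySem.List.pyRange_one_eq_nil, pvT]
  | succ m ih =>
    have hm : m ≤ A.length := by omega
    rw [show ((m + 1 : Nat) : Int) = (m : Int) + 1 by push_cast; ring]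
    rw [PySem.List.pyRange_one_succ_right (by positivity)]
    rw [List.foldl_append, ih hm]
    simp only [List.foldl_cons, List.foldl_nil]
    rw [List.range_succ, List.map_append]
    simp only [List.map_cons, List.map_nil]
    rw [PySem.List.pyGetD_neg_one_append_singleton]
    rw [PySem.List.pyGetD_natCast]
    have hx : A[m]?.getD 0 + pvT A m = pvT A (m + 1) := by
      rw [pvT_succ A m (by omega)]
      simp [List.getD]
      ring
    rw [List.range_succ (n := m + 1), List.map_append]
    simp [hx, List.range_succ]

theorem pvB_char (A : List Int) (n : Nat) :
    (PySem.List.pyRange 0 (((List.range (n + 1)).map (pvT A)).length : Int) 1).foldl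
      (fun acc i => (PySem.List.pyRange (i + 1) (((List.range (n + 1)).map (pvT A)).length : Int) 1).foldl
        (fun acc2 j => acc2 ++ [PySem.List.pyGetD ((List.range (n + 1)).map (pvT A)) j 0
                                 - PySem.List.pyGetD ((List.range (n + 1)).map (pvT A)) i 0]) acc) []
    = pvRef A n := by
  have hlen : ((((List.range (n + 1)).map (pvT A)).length : Nat) : Int) = ((n + 1 : Nat) : Int) := by
    simp
  rw [hlen]
  rw [PySem.List.pyRange_one 0 ((n + 1 : Nat) : Int)]
  rw [show (((n + 1 : Nat) : Int) - 0).toNat = n + 1 by simp]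
  rw [List.foldl_map]
  rw [PySem.List.foldl_congr_mem _ _
    (fun acc k => acc ++ (List.range (n - k)).map (fun t => pvT A (k + 1 + t) - pvT A k)) _ ?hcong]
  · rw [PySem.List.foldl_append_eq_flatMap]
    rw [List.nil_append, List.range_succ, List.flatMap_append]
    simp [pvRef]
  case hcong =>
    intro acc k hk
    have hk' : k < n + 1 := List.mem_range.mp hk
    rw [show ((0 : Int) + (k : Int)) = ((k : Nat) : Int) by simp]
    rw [PySem.List.pyRange_one ((k : Int) + 1) ((n + 1 : Nat) : Int)]
    rw [show (((n + 1 : Nat) : Int) - ((k : Int) + 1)).toNat = n - k by omega]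
    rw [List.foldl_map]
    rw [PySem.List.foldl_append_singleton_eq_map]
    congr 1
    apply List.map_congr_left
    intro t ht
    have ht' : t < n - k := List.mem_range.mp ht
    rw [show ((k : Int) + 1 + (t : Int)) = ((k + 1 + t : Nat) : Int) by push_cast; ring]
    rw [PySem.List.pyGetD_natCast, PySem.List.pyGetD_natCast]
    rw [PySem.List.getD_map_range _ _ _ _ (by omega), PySem.List.getD_map_range _ _ _ _ (by omega)]

theorem pvAlt_inner (A : List Int) : ∀ (cnt k : Nat) (acc : List Int) (s : Int),
    k + cnt ≤ A.length →
    (PySem.List.pyRange (k : Int) ((k + cnt : Nat) : Int) 1).foldl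
      (fun (p : List Int × Int) j =>
        let s' := p.2 + PySem.List.pyGetD A j 0
        (p.1 ++ [s'], s')) (acc, s)
    = (acc ++ (List.range cnt).map (fun t => s + (pvT A (k + 1 + t) - pvT A k)),
       s + (pvT A (k + cnt) - pvT A k))
  | 0, k, acc, s, h => by
    rw [PySem.List.pyRange_one_eq_nil (by simp)]
    simp
  | cnt + 1, k, acc, s, h => by
    rw [PySem.List.pyRange_one_cons (by push_cast; omega)]
    rw [List.foldl_cons]
    simp only []
    rw [PySem.List.pyGetD_natCast]
    rw [show ((k : Int) + 1) = ((k + 1 : Nat) : Int) from by push_cast; ring]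
    rw [show ((k + (cnt + 1) : Nat) : Int) = (((k + 1) + cnt : Nat) : Int) from by push_cast; ring]
    rw [pvAlt_inner A cnt (k + 1) (acc ++ [s + A.getD k 0]) (s + A.getD k 0) (by omega)]
    have hg : A.getD k 0 = pvT A (k + 1) - pvT A k := by
      rw [pvT_succ A k (by omega)]; ring
    simp only [Prod.mk.injEq]
    refine ⟨?_, by rw [hg, show k + (cnt + 1) = k + 1 + cnt from by omega]; ring⟩
    rw [List.range_succ_eq_map, List.map_cons, List.map_map]
    rw [show acc ++ (s + (pvT A (k + 1 + 0) - pvT A k)) :: List.map ((fun t => s + (pvT A (k + 1 + t) - pvT A k)) ∘ Nat.succ) (List.range cnt)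
        = acc ++ [s + (pvT A (k + 1 + 0) - pvT A k)] ++ List.map ((fun t => s + (pvT A (k + 1 + t) - pvT A k)) ∘ Nat.succ) (List.range cnt) from by simp]
    congr 1
    · simp [← hg, List.getD]
    · apply List.map_congr_left
      intro t _
      simp only [Function.comp_apply]
      rw [hg, show k + 1 + t.succ = k + 1 + 1 + t from by omega]
      ring

/-- B's running-accumulation sums list is the same reference list -/
theorem pvAlt_char (A : List Int) (n : Nat) (h : n ≤ A.length) :
    (PySem.List.pyRange 0 ((n : Nat) : Int) 1).foldl (fun acc i =>
      ((PySem.List.pyRange i ((n : Nat) : Int) 1).foldl (fun (p : List Int × Int) j =>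
        let s := p.2 + PySem.List.pyGetD A j 0
        (p.1 ++ [s], s)) (acc, 0)).1) []
    = pvRef A n := by
  rw [PySem.List.pyRange_one 0 ((n : Nat) : Int)]
  rw [show (((n : Nat) : Int) - 0).toNat = n from by simp]
  rw [List.foldl_map]
  rw [PySem.List.foldl_congr_mem _ _
    (fun acc k => acc ++ (List.range (n - k)).map (fun t => pvT A (k + 1 + t) - pvT A k)) _ ?hcong]
  · rw [PySem.List.foldl_append_eq_flatMap]
    simp [pvRef]
  case hcong =>
    intro acc k hk
    have hk' : k < n := List.mem_range.mp hk
    rw [show ((0 : Int) + (k : Int)) = ((k : Nat) : Int) from by simp]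
    rw [show ((n : Nat) : Int) = ((k + (n - k) : Nat) : Int) from by push_cast; omega]
    rw [pvAlt_inner A (n - k) k acc 0 (by omega)]
    simp

/-- A's inner count loop, as `pvAstep` -/
theorem pvAfun_eq (K : Int) (B : List Int) :
    (fun (ans i : Int) =>
      let ans1 := ans + 2 ^ i.toNat
      let c : Int := (PySem.List.pyRange 0 (B.length : Int) 1).foldl
        (fun c j => if PySem.Int.band (PySem.List.pyGetD B j 0) ans1 == ans1 then c + 1 else c) 0
      if c < K then ans1 - 2 ^ i.toNat else ans1) = pvAstep K B := by
  funext ans i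
  simp only [pvAstep]
  rw [PySem.List.foldl_pyRange_zero_pyGetD' B 0
    (fun c b => if PySem.Int.band b (ans + 2 ^ i.toNat) == ans + 2 ^ i.toNat then c + 1 else c) 0]
  rw [PySem.List.foldl_count_if
    (fun b => PySem.Int.band b (ans + 2 ^ i.toNat) == ans + 2 ^ i.toNat) B 0]
  rw [Int.zero_add]
  rfl

-- ===== VERDICT (by name: the statement is the Claim_ definition above) =====
theorem find_max_bitwise_and_of_subsequence_beauties_spec : Claim_equal_find_max_bitwise_and_of_subsequence_beauties := by
  intro N K A _ hpre
  unfold Pre_find_max_bitwise_and_of_subsequence_beauties at hpre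
  unfold Spec_find_max_bitwise_and_of_subsequence_beauties
  have key : ∀ sums : List Int,
      (PySem.List.pyRange 50 (-1) (-1)).foldl (pvAstep K sums) 0 = pvBest K 51 sums := by
    intro sums
    have h50 : ((50 : Nat) : Int) = (50 : Int) := by norm_num
    have := pvG K sums 50 0 (le_refl 0) (dvd_zero _)
    rw [h50] at this
    rw [this]
    rw [List.filter_eq_self.mpr (fun b _ => pvMatch_zero b)]
    ring
  unfold find_max_bitwise_and_of_subsequence_beauties
  unfold find_max_bitwise_and_of_subsequence_beauties_alt
  by_cases h0 : 0 ≤ N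
  · rw [show N = ((N.toNat : Nat) : Int) from (Int.toNat_of_nonneg h0).symm]
    have hn : N.toNat ≤ A.length := by omega
    simp only [pvS_char A N.toNat hn, pvB_char A N.toNat, pvAlt_char A N.toNat hn, pvAfun_eq]
    exact key (pvRef A N.toNat)
  · rw [PySem.List.pyRange_one_eq_nil (by omega)]
    simp only [List.foldl_nil]
    have hB : (PySem.List.pyRange 0 (([(0 : Int)].length : Nat) : Int) 1).foldl
        (fun acc i => (PySem.List.pyRange (i + 1) (([(0 : Int)].length : Nat) : Int) 1).foldl
          (fun acc2 j => acc2 ++ [PySem.List.pyGetD [(0 : Int)] j 0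
                                   - PySem.List.pyGetD [(0 : Int)] i 0]) acc) []
        = ([] : List Int) := by decide
    simp only [hB, pvAfun_eq]
    exact key []
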